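-- pv_equiv track=rewrite | github.com/CUBOPLUS-BTC/satscore-cubo-tech | src/app/pipeline/etl.py | _deduplicate_prices
-- ===== SOURCE A (Python) =====
-- from typing import Any, Callable, Dict, List, Optional
--
-- def _deduplicate_prices(data: List[Dict]) -> List[Dict]:
--     seen = set()
--     out = []
--     for row in data:
--         ts = row.get("timestamp")
--         if ts not in seen:
--             seen.add(ts)
--             out.append(row)
--     return sorted(out, key=lambda r: r.get("timestamp", 0))
-- ===== SOURCE B (Python) =====
-- def _deduplicate_prices(data):
--     out = []
--     for row in data:
--         ts = row.get("timestamp")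
--         if any(r.get("timestamp") == ts for r in out):
--             continue
--         k = row.get("timestamp", 0)
--         i = 0
--         while i < len(out) and out[i].get("timestamp", 0) <= k:
--             i += 1
--         out.insert(i, row)
--     return out
-- ===== Notes on version B (the rewrite author's own statement) =====
-- stated objective: alternative
-- what changed: A dedups with a seen set in one pass and then calls a batch sort on the survivors; B has no seen set and no sort call: it maintains a single sorted duplicate-free output list online, scanning it for the row's timestamp and otherwise inserting the row at its sorted position (insertion sort fused with dedup).
import Mathlib
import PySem

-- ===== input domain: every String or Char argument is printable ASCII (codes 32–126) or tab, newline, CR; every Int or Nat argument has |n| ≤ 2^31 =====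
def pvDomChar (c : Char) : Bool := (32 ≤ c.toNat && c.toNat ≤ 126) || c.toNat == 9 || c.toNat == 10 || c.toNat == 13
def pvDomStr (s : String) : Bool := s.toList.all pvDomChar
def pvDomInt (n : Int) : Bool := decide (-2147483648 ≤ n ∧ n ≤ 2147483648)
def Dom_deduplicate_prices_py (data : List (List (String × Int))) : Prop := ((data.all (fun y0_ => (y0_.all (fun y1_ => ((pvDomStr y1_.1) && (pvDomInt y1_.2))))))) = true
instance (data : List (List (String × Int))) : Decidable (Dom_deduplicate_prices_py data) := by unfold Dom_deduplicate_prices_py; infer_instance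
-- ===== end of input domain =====

-- B replaces A's seen-set dedup followed by a batch sort with a single online pass that
-- keeps a sorted, duplicate-free accumulator and inserts each fresh row at its position
-- (insertion sort fused with dedup); alternative decomposition, no speed claim.

-- row.get("timestamp")  (shared key-extraction helpers; rows are association lists)
def pvTs (row : List (String × Int)) : Option Int := (PySem.Dict.mk row).get? "timestamp"
-- row.get("timestamp", 0)
def pvKey (row : List (String × Int)) : Int := (PySem.Dict.mk row).getD "timestamp" 0

-- ===== PORT A =====
def deduplicate_prices_py (data : List (List (String × Int))) : List (List (String × Int)) :=
  -- seen = set(); out = []; for row in data: …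
  let st := data.foldl
    (fun (st : PySem.Set (Option Int) × List (List (String × Int))) row =>
      let ts := pvTs row
      if PySem.Set.contains st.1 ts then st
      else (PySem.Set.add st.1 ts, st.2 ++ [row]))
    (PySem.Set.empty, [])
  PySem.List.sorted st.2 (fun r => pvKey r) false

-- ===== PORT B =====
-- the while-loop + insert of Source B: walk past entries with key ≤ k, put row there
def pvIns (k : Int) (row : List (String × Int)) :
    List (List (String × Int)) → List (List (String × Int))
  | [] => [row]
  | y :: ys => if pvKey y ≤ k then y :: pvIns k row ys else row :: y :: ys

def deduplicate_prices_py_alt (data : List (List (String × Int))) : List (List (String × Int)) :=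
  data.foldl
    (fun out row =>
      if out.any (fun r => pvTs r == pvTs row) then out
      else pvIns (pvKey row) row out)
    []

-- ===== PRECONDITION & SPEC =====
def Spec_deduplicate_prices_py (data : List (List (String × Int))) (out : List (List (String × Int))) : Prop := out = deduplicate_prices_py_alt data
instance (data : List (List (String × Int))) (out : List (List (String × Int))) : Decidable (Spec_deduplicate_prices_py data out) := by unfold Spec_deduplicate_prices_py; infer_instance

-- ===== CLAIM (what is proved, stated in full; the proofs are below) =====
def Claim_equal_deduplicate_prices_py : Prop := ∀ (data : List (List (String × Int))), Dom_deduplicate_prices_py data → Spec_deduplicate_prices_py data (deduplicate_prices_py data)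

-- ===== LEMMAS AND PROOFS =====

theorem pvBeq_comm (x y : Option Int) : (x == y) = (y == x) := by
  by_cases h : x = y
  · simp [h]
  · simp [h, Ne.symm h]

theorem pvSet_contains_add (s : PySem.Set (Option Int)) (x y : Option Int) :
    (PySem.Set.add s x).contains y = (s.contains y || y == x) := by
  rw [PySem.Set.add_eq_ite]
  by_cases hx : x ∈ s
  · rw [if_pos hx]
    by_cases hy : y = x
    · subst hy
      simp [hx]
    · simp [hy]
  · rw [if_neg hx]
    by_cases hy : y = x
    · subst hy; simp [PySem.Set.contains_eq_listContains]
    · simp [PySem.Set.contains_eq_listContains, hy]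

-- A's kept list, written as direct recursion (proof helper, not a port)
def pvKeepFirst (seen : PySem.Set (Option Int)) : List (List (String × Int)) → List (List (String × Int))
  | [] => []
  | row :: rest =>
    let ts := pvTs row
    if PySem.Set.contains seen ts then pvKeepFirst seen rest
    else row :: pvKeepFirst (PySem.Set.add seen ts) rest

theorem pvKF_nil (s : PySem.Set (Option Int)) : pvKeepFirst s [] = [] := rfl

theorem pvKF_cons_pos {s : PySem.Set (Option Int)} {r : List (String × Int)}
    (rs : List (List (String × Int))) (h : PySem.Set.contains s (pvTs r) = true) :
    pvKeepFirst s (r :: rs) = pvKeepFirst s rs := by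
  simp only [pvKeepFirst, h, if_true]

theorem pvKF_cons_neg {s : PySem.Set (Option Int)} {r : List (String × Int)}
    (rs : List (List (String × Int))) (h : PySem.Set.contains s (pvTs r) = false) :
    pvKeepFirst s (r :: rs) = r :: pvKeepFirst (PySem.Set.add s (pvTs r)) rs := by
  simp only [pvKeepFirst, h, Bool.false_eq_true, if_false]

-- A's loop computes pvKeepFirst (second component), for any starting state
theorem pvA_fold (xs : List (List (String × Int))) :
    ∀ (s : PySem.Set (Option Int)) acc,
    (xs.foldl
      (fun (st : PySem.Set (Option Int) × List (List (String × Int))) row =>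
        let ts := pvTs row
        if PySem.Set.contains st.1 ts then st
        else (PySem.Set.add st.1 ts, st.2 ++ [row])) (s, acc)).2
      = acc ++ pvKeepFirst s xs := by
  induction xs with
  | nil => simp [pvKF_nil]
  | cons r rs ih =>
    intro s acc
    simp only [List.foldl_cons]
    cases h : PySem.Set.contains s (pvTs r) with
    | true =>
      rw [pvKF_cons_pos rs h]
      simpa [h] using ih s acc
    | false =>
      rw [pvKF_cons_neg rs h]
      have := ih (PySem.Set.add s (pvTs r)) (acc ++ [r])
      simp only [h, Bool.false_eq_true, if_false] at *
      rw [this, List.append_assoc, List.singleton_append]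

-- first-occurrence filtering of xs ++ [x]
theorem pvKeepFirst_append_singleton (x : List (String × Int)) (xs : List (List (String × Int))) :
    ∀ s : PySem.Set (Option Int),
    pvKeepFirst s (xs ++ [x])
      = if (s.contains (pvTs x) || xs.any (fun y => pvTs y == pvTs x)) then pvKeepFirst s xs
        else pvKeepFirst s xs ++ [x] := by
  induction xs with
  | nil =>
    intro s
    simp only [List.nil_append, List.any_nil, Bool.or_false, pvKF_nil]
    cases hc : PySem.Set.contains s (pvTs x) with
    | true => rw [if_pos rfl, pvKF_cons_pos [] hc, pvKF_nil]
    | false =>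
      rw [if_neg (by simp), pvKF_cons_neg [] hc, pvKF_nil]
  | cons y ys ih =>
    intro s
    rw [List.cons_append]
    cases hy : PySem.Set.contains s (pvTs y) with
    | true =>
      rw [pvKF_cons_pos _ hy, ih s, pvKF_cons_pos ys hy]
      by_cases hd : pvTs y = pvTs x
      · have hx : PySem.Set.contains s (pvTs x) = true := hd ▸ hy
        simp [(PySem.Set.contains_iff _ _).1 hx]
      · have hstep : (y :: ys).any (fun y => pvTs y == pvTs x) = ys.any (fun y => pvTs y == pvTs x) := by
          simp [List.any_cons, hd]
        rw [hstep]
    | false =>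
      rw [pvKF_cons_neg _ hy, ih _, pvKF_cons_neg ys hy]
      have hcond : ((PySem.Set.add s (pvTs y)).contains (pvTs x) || ys.any (fun y => pvTs y == pvTs x))
          = (s.contains (pvTs x) || (y :: ys).any (fun y => pvTs y == pvTs x)) := by
        simp only [pvSet_contains_add, List.any_cons, pvBeq_comm (pvTs x) (pvTs y)]
        cases s.contains (pvTs x) <;> cases (pvTs y == pvTs x) <;>
          cases ys.any (fun y => pvTs y == pvTs x) <;> rfl
      rw [hcond]
      cases hc : (s.contains (pvTs x) || (y :: ys).any (fun y => pvTs y == pvTs x)) with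
      | true => rw [if_pos rfl, if_pos rfl]
      | false => rw [if_neg (by simp), if_neg (by simp), List.cons_append]

-- the timestamps present in pvKeepFirst s xs are exactly those of xs not already in s
theorem pvKF_ts (xs : List (List (String × Int))) :
    ∀ (s : PySem.Set (Option Int)) (t : Option Int),
    ((pvKeepFirst s xs).any (fun r => pvTs r == t))
      = (!s.contains t && xs.any (fun r => pvTs r == t)) := by
  induction xs with
  | nil => intro s t; simp [pvKF_nil]
  | cons y ys ih =>
    intro s t
    cases hy : PySem.Set.contains s (pvTs y) with
    | true =>
      rw [pvKF_cons_pos ys hy, ih s t, List.any_cons]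
      by_cases hd : pvTs y = t
      · have hm : t ∈ s := (PySem.Set.contains_iff _ _).1 (hd ▸ hy)
        simp [hm]
      · have hb : (pvTs y == t) = false := by simp [hd]
        rw [hb, Bool.false_or]
    | false =>
      have hm : pvTs y ∉ s := fun h => by
        rw [(PySem.Set.contains_iff _ _).2 h] at hy; exact Bool.true_eq_false.mp hy
      rw [pvKF_cons_neg ys hy, List.any_cons, List.any_cons, ih _ t, pvSet_contains_add]
      by_cases hd : pvTs y = t
      · subst hd
        simp [hm]
      · have hb : (pvTs y == t) = false := by simp [hd]
        have hb' : (t == pvTs y) = false := by simp [Ne.symm hd]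
        rw [hb, hb']; simp

theorem pvSorted_append_singleton (ys : List (List (String × Int))) (x : List (String × Int)) :
    PySem.List.sorted (ys ++ [x]) (fun r => pvKey r) false
      = PySem.List.insertBy (fun a b => decide (pvKey a < pvKey b)) x
          (PySem.List.sorted ys (fun r => pvKey r) false) := by
  rw [PySem.List.sorted_eq_foldl_insertBy, PySem.List.sorted_eq_foldl_insertBy, List.foldl_append]
  rfl

-- Source B's positional insert is exactly stable insertBy on the sort key
theorem pvIns_eq_insertBy (x : List (String × Int)) (zs : List (List (String × Int))) :
    pvIns (pvKey x) x zs = PySem.List.insertBy (fun a b => decide (pvKey a < pvKey b)) x zs := by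
  induction zs with
  | nil => rfl
  | cons z t ih =>
    simp only [pvIns, PySem.List.insertBy]
    by_cases h : pvKey z ≤ pvKey x
    · rw [if_pos h, if_neg (by simpa using not_lt.2 h), ih]
    · rw [if_neg h, if_pos (by simpa using not_le.1 h)]

-- empty seen set contains nothing
theorem pvEmpty_contains (t : Option Int) : (PySem.Set.empty : PySem.Set (Option Int)).contains t = false := by
  simp [PySem.Set.contains_eq_listContains, PySem.Set.empty]

-- main invariant: B's fold is the sorted A-kept list
theorem pvB_eq_sorted_keep (xs : List (List (String × Int))) :
    deduplicate_prices_py_alt xs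
      = PySem.List.sorted (pvKeepFirst PySem.Set.empty xs) (fun r => pvKey r) false := by
  induction xs using List.reverseRecOn with
  | nil => rfl
  | append_singleton xs x ih =>
    unfold deduplicate_prices_py_alt at *
    rw [List.foldl_append, List.foldl_cons, List.foldl_nil, ih]
    rw [pvKeepFirst_append_singleton x xs PySem.Set.empty, pvEmpty_contains, Bool.false_or]
    have hany : (PySem.List.sorted (pvKeepFirst PySem.Set.empty xs) (fun r => pvKey r) false).any
        (fun r => pvTs r == pvTs x) = xs.any (fun r => pvTs r == pvTs x) := by
      rw [(PySem.List.sorted_perm (pvKeepFirst PySem.Set.empty xs) _ _).any_eq,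
        pvKF_ts xs PySem.Set.empty (pvTs x), pvEmpty_contains]
      simp
    rw [hany]
    cases hc : xs.any (fun r => pvTs r == pvTs x) with
    | true => rw [if_pos rfl, if_pos rfl]
    | false =>
      rw [if_neg (by simp), if_neg (by simp), pvSorted_append_singleton, pvIns_eq_insertBy]

-- ===== VERDICT (by name: the statement is the Claim_ definition above) =====
theorem deduplicate_prices_py_spec : Claim_equal_deduplicate_prices_py := by
  intro data _
  show PySem.List.sorted
      (data.foldl
        (fun (st : PySem.Set (Option Int) × List (List (String × Int))) row =>
          let ts := pvTs row
          if PySem.Set.contains st.1 ts then st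
          else (PySem.Set.add st.1 ts, st.2 ++ [row]))
        (PySem.Set.empty, [])).2 (fun r => pvKey r) false
    = deduplicate_prices_py_alt data
  rw [pvA_fold data PySem.Set.empty [], pvB_eq_sorted_keep data]
  simp
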